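-- pv_equiv track=rewrite | github.com/YuvalShaffir/Hanoi-Game-Python | ex7.py | string_from_one_char_only
-- ===== SOURCE A (Python) =====
-- def string_from_one_char_only(string, checked_char):
--     """The function checks if the string is built from one character,
--     if it is than it will return True, else False."""
--     count = 0
--     for char in string:
--         if char == checked_char:
--             count += 1
--         else:
--             return False
--     if len(string) == count and count >= 1:
--         return True
--     else:
--         return False
-- ===== SOURCE B (Python) =====
-- def string_from_one_char_only(string, checked_char):
--     """The function checks if the string is built from one character,
--     if it is than it will return True, else False."""
--     return set(string) == {checked_char}
-- ===== Notes on version B (the rewrite author's own statement) =====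
-- stated objective: idiomatic
-- what changed: Replaced the counting loop with early exit by a single set-equality test: set(string) == {checked_char}, which also covers the empty-string and multi-char checked_char cases without explicit logic.
import Mathlib
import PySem

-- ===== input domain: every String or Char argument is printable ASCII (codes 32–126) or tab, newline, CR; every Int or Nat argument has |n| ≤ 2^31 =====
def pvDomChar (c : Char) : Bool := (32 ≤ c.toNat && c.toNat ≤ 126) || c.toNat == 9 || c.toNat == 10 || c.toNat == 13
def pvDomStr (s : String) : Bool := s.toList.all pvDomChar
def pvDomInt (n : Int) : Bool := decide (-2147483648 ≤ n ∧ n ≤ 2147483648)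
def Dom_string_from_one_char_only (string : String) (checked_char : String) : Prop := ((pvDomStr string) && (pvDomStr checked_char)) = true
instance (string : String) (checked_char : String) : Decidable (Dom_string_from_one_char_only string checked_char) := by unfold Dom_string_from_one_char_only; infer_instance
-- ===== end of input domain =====

-- B replaces A's counting loop with a single set-equality test (idiomatic one-liner).

-- ===== PORT A =====
-- A's for-loop: early `return False` on a mismatch, else count += 1; after the loop,
-- `len(string) == count and count >= 1`.
def sfocoGo (checked_char : String) (slen : Int) : List Char → Int → Bool
  | [], count => decide (slen = count ∧ 1 ≤ count)
  | c :: rest, count =>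
      if String.mk [c] = checked_char then sfocoGo checked_char slen rest (count + 1)
      else false

def string_from_one_char_only (string : String) (checked_char : String) : Bool :=
  sfocoGo checked_char (string.toList.length : Int) string.toList 0

-- ===== PORT B =====
-- Source B: `return set(string) == {checked_char}` — set of 1-char strings of `string`.
def string_from_one_char_only_alt (string : String) (checked_char : String) : Bool :=
  PySem.Set.equal
    (PySem.Set.ofList (string.toList.map (fun c => String.mk [c])))
    (PySem.Set.ofList [checked_char])

-- ===== PRECONDITION & SPEC =====
def Spec_string_from_one_char_only (string : String) (checked_char : String) (out : Bool) : Prop := out = string_from_one_char_only_alt string checked_char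
instance (string : String) (checked_char : String) (out : Bool) : Decidable (Spec_string_from_one_char_only string checked_char out) := by unfold Spec_string_from_one_char_only; infer_instance

-- ===== CLAIM (what is proved, stated in full; the proofs are below) =====
def Claim_equal_string_from_one_char_only : Prop := ∀ (string : String) (checked_char : String), Dom_string_from_one_char_only string checked_char → Spec_string_from_one_char_only string checked_char (string_from_one_char_only string checked_char)

-- ===== LEMMAS AND PROOFS =====

-- A's loop, with the invariant slen = count + remaining length.
theorem sfocoGo_char (checked : String) :
    ∀ (cs : List Char) (count : Int),
      sfocoGo checked (count + (cs.length : Int)) cs count =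
        (cs.all (fun c => decide (String.mk [c] = checked)) && decide (1 ≤ count + (cs.length : Int))) := by
  intro cs
  induction cs with
  | nil => intro count; simp [sfocoGo]
  | cons c rest ih =>
      intro count
      simp only [sfocoGo, List.length_cons]
      by_cases h : String.mk [c] = checked
      · rw [if_pos h]
        conv_lhs => rw [show (count + (((rest.length + 1 : Nat)) : Int)) = (count + 1) + (rest.length : Int) by push_cast; ring]
        rw [ih (count + 1)]
        have hd : (decide (1 ≤ count + 1 + (rest.length : Int))) = decide (1 ≤ count + (((rest.length + 1 : Nat)) : Int)) := by
          apply decide_eq_decide.mpr; push_cast; omega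
        simp [h, hd]
      · simp [h]

-- A = true ↔ every char matches and the string is nonempty.
theorem portA_iff (string checked : String) :
    string_from_one_char_only string checked = true ↔
      ((∀ c ∈ string.toList, String.mk [c] = checked) ∧ string.toList ≠ []) := by
  unfold string_from_one_char_only
  rw [show ((string.toList.length : Int)) = 0 + (string.toList.length : Int) by ring]
  rw [sfocoGo_char]
  simp only [Bool.and_eq_true, List.all_eq_true, decide_eq_true_eq]
  constructor
  · rintro ⟨hall, hlen⟩
    refine ⟨hall, ?_⟩
    intro hnil
    rw [hnil] at hlen
    simp at hlen
  · rintro ⟨hall, hne⟩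
    refine ⟨hall, ?_⟩
    have : 0 < string.toList.length := List.length_pos_iff.mpr hne
    omega

-- B = true ↔ the same condition.
theorem portB_iff (string checked : String) :
    string_from_one_char_only_alt string checked = true ↔
      ((∀ c ∈ string.toList, String.mk [c] = checked) ∧ string.toList ≠ []) := by
  unfold string_from_one_char_only_alt
  rw [PySem.Set.equal_iff]
  constructor
  · intro h
    constructor
    · intro c hc
      have := (h (String.mk [c])).mp (by
        rw [PySem.Set.mem_ofList]
        exact List.mem_map.mpr ⟨c, hc, rfl⟩)
      rw [PySem.Set.mem_ofList] at this
      simpa using this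
    · intro hnil
      have := (h checked).mpr (by rw [PySem.Set.mem_ofList]; simp)
      rw [PySem.Set.mem_ofList, hnil] at this
      simp at this
  · rintro ⟨hall, hne⟩
    intro x
    rw [PySem.Set.mem_ofList, PySem.Set.mem_ofList]
    constructor
    · intro hx
      obtain ⟨c, hc, rfl⟩ := List.mem_map.mp hx
      simp [hall c hc]
    · intro hx
      simp only [List.mem_singleton] at hx
      subst hx
      obtain ⟨c, hc⟩ := List.exists_mem_of_ne_nil _ hne
      exact List.mem_map.mpr ⟨c, hc, hall c hc⟩

-- ===== VERDICT (by name: the statement is the Claim_ definition above) =====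
theorem string_from_one_char_only_spec : Claim_equal_string_from_one_char_only := by
  intro string checked_char _
  unfold Spec_string_from_one_char_only
  rw [Bool.eq_iff_iff, portA_iff, portB_iff]
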